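-- pv_equiv track=rewrite | github.com/ydb-platform/ydb | contrib/python/salt-pepper/pepper/retcode.py | validate_fail_any_none
-- ===== SOURCE A (Python) =====
-- def validate_fail_any_none(result):
--     '''
--     Validate result dictionary retcode values.
--     Returns -1 if no retcode keys.
--     Returns first non zero retcode if any of recodes is non zero.
--
--     :param result: dictionary from Saltstack master
--
--     :return: exit code
--     '''
--     if isinstance(result, list):
--         if isinstance(result[0], dict):
--             minion = result[0]
--             retcodes = list(minion[name].get('retcode')
--                             for name in minion if isinstance(minion[name], dict) and
--                             minion[name].get('retcode') is not None)
--             if not retcodes: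
--                 return -1  # there are no retcodes
--             return next((r for r in retcodes if r != 0), 0)
--     return -1
-- ===== SOURCE B (Python) =====
-- def validate_fail_any_none(result):
--     if isinstance(result, list) and isinstance(result[0], dict):
--         found = False
--         for value in result[0].values():
--             if isinstance(value, dict):
--                 r = value.get('retcode')
--                 if r is not None:
--                     if r != 0:
--                         return r
--                     found = True
--         return 0 if found else -1
--     return -1
-- ===== Notes on version B (the rewrite author's own statement) =====
-- stated objective: simpler
-- what changed: Replaces A's two passes (a comprehension materialising the full retcodes list, then a next() scan over it) with one loop over the minion's values that returns the first non-zero retcode immediately and tracks a found flag for the 0/-1 decision.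
import Mathlib
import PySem

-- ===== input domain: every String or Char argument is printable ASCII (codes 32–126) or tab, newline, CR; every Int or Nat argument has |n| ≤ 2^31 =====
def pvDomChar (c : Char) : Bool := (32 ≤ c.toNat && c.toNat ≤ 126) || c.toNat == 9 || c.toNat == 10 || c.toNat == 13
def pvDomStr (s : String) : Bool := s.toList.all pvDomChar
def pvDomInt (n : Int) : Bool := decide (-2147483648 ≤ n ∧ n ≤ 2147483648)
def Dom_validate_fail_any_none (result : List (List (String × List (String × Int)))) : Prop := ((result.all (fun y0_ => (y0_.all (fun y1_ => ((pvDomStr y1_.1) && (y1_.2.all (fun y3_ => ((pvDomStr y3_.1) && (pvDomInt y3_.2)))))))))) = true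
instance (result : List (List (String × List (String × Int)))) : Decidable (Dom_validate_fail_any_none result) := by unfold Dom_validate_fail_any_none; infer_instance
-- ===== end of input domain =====

-- B collapses A's two passes (materialise the retcodes list, then scan it) into one
-- loop with an early return and a found flag (objective: simpler).


-- ===== PORT A =====
-- 'for name in minion … minion[name].get("retcode")': the dicts arrive as assoc
-- lists; PySem.Dict.ofList rebuilds the Python dict (insertion order, overwrite).
def validate_fail_any_none (result : List (List (String × List (String × Int)))) : Int :=
  match result with
  | [] => -1      -- result[0] raises IndexError in Python; excluded by Pre_
  | minion :: _ =>
    let m := PySem.Dict.ofList minion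
    -- isinstance(minion[name], dict) is always true at this type
    let retcodes := m.items.filterMap (fun p => (PySem.Dict.ofList p.2).get? "retcode")
    if retcodes = [] then -1
    else ((retcodes.find? (fun r => r != 0)).getD 0)

-- ===== PORT B =====
-- single pass over the values: return the first non-zero retcode at once,
-- remember in `found` whether any retcode was seen
def pvAltLoop (items : List (String × List (String × Int))) (found : Bool) : Int :=
  match items with
  | [] => if found then 0 else -1
  | (_, v) :: rest =>
    match (PySem.Dict.ofList v).get? "retcode" with
    | none => pvAltLoop rest found
    | some r => if r != 0 then r else pvAltLoop rest true

def validate_fail_any_none_alt (result : List (List (String × List (String × Int)))) : Int :=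
  match result with
  | [] => -1      -- result[0] raises IndexError in Python; excluded by Pre_
  | minion :: _ => pvAltLoop (PySem.Dict.ofList minion).items false

-- ===== PRECONDITION & SPEC =====
-- Pre_ excludes only the empty list, on which A's result[0] raises IndexError.
def Pre_validate_fail_any_none (result : List (List (String × List (String × Int)))) : Prop :=
  result ≠ []
instance (result : List (List (String × List (String × Int)))) : Decidable (Pre_validate_fail_any_none result) := by unfold Pre_validate_fail_any_none; infer_instance

def pvWitness_validate_fail_any_none : (List (List (String × List (String × Int)))) :=
  [[("minion1", [("retcode", 2)]), ("minion2", [("retcode", 0)])]]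

def Spec_validate_fail_any_none (result : List (List (String × List (String × Int)))) (out : Int) : Prop := out = validate_fail_any_none_alt result
instance (result : List (List (String × List (String × Int)))) (out : Int) : Decidable (Spec_validate_fail_any_none result out) := by unfold Spec_validate_fail_any_none; infer_instance

-- ===== CLAIM (what is proved, stated in full; the proofs are below) =====
def Claim_equal_validate_fail_any_none : Prop := ∀ (result : List (List (String × List (String × Int)))), Dom_validate_fail_any_none result → Pre_validate_fail_any_none result → Spec_validate_fail_any_none result (validate_fail_any_none result)

-- ===== LEMMAS AND PROOFS =====
-- B's loop computes A's value: with rc the retcodes extracted from `items`,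
-- the loop returns the first non-zero element of rc, else 0 if rc is nonempty
-- or `found` was already set, else -1.
theorem pvAltLoop_eq (items : List (String × List (String × Int))) (found : Bool) :
    pvAltLoop items found =
      (if items.filterMap (fun p => (PySem.Dict.ofList p.2).get? "retcode") = [] then
        (if found then 0 else -1)
       else (((items.filterMap (fun p => (PySem.Dict.ofList p.2).get? "retcode")).find?
              (fun r => r != 0)).getD 0)) := by
  induction items generalizing found with
  | nil => cases found <;> rfl
  | cons hd tl ih =>
    obtain ⟨k, v⟩ := hd
    rw [show pvAltLoop ((k, v) :: tl) found =
          (match (PySem.Dict.ofList v).get? "retcode" with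
           | none => pvAltLoop tl found
           | some r => if r != 0 then r else pvAltLoop tl true) from rfl]
    simp only [List.filterMap_cons]
    cases hv : (PySem.Dict.ofList v).get? "retcode" with
    | none => exact ih found
    | some r =>
      dsimp only
      rw [if_neg (List.cons_ne_nil _ _)]
      by_cases hr : r = 0
      · subst hr
        rw [if_neg (by decide), List.find?_cons_of_neg (by decide), ih true]
        by_cases h2 : tl.filterMap (fun p => (PySem.Dict.ofList p.2).get? "retcode") = []
        · rw [if_pos h2, h2]; rfl
        · rw [if_neg h2]
      · rw [if_pos (by simpa using hr), List.find?_cons_of_pos (by simpa using hr)]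
        rfl

theorem validate_fail_any_none_spec : Claim_equal_validate_fail_any_none := by
  intro result _hdom hpre
  unfold Spec_validate_fail_any_none
  match result with
  | [] => exact absurd rfl hpre
  | minion :: rest =>
    simp only [validate_fail_any_none, validate_fail_any_none_alt]
    rw [pvAltLoop_eq]
    split <;> norm_num
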